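-- pv_equiv track=rewrite | github.com/pandayo/aoc2018 | 20181215.py | is_nearest
-- ===== SOURCE A (Python) =====
-- def is_nearest(area, units, unit, reachable_squares):
--     closest = {}
--     distance = len(area)**2
--     for rpos, rpath in reachable_squares.items():
--         if rpath is None:
--             continue
--         rdis = len(rpath)-1
--         if rdis < distance:
--             closest = {}
--             distance = rdis
--             closest[rpos] = rpath
--         elif rdis == distance:
--             closest[rpos] = rpath
--     if len(closest) > 0:
--         return(closest)
-- ===== SOURCE B (Python) =====
-- def is_nearest(area, units, unit, reachable_squares):
--     valid = {pos: path for pos, path in reachable_squares.items() if path is not None}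
--     if not valid:
--         return None
--     m = min(len(path) - 1 for path in valid.values())
--     return {pos: path for pos, path in valid.items() if len(path) - 1 == m}
-- ===== Notes on version B (the rewrite author's own statement) =====
-- stated objective: simpler
-- what changed: Replaces A's fused running-minimum loop that resets and rebuilds its dict on each strict improvement with two shaped passes (collect the valid non-None entries, take the minimum distance, return the dict of entries at that distance); Pre_ excludes association lists with duplicate keys, which do not represent any Python dict input.
-- intended difference: On inputs where every reachable path is longer than len(area)**2 steps, A returns None (its running minimum is seeded with len(area)**2, so such squares are never recorded) while B returns the squares at the true minimal distance, which is what a nearest-square search should report; the seed is an arbitrary cap, not a specified bound. — e.g. on is_nearest([], [], [], [([0], some [[0], [1]])]): A returns none, B returns some [([0], [[0], [1]])]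
import Mathlib
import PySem

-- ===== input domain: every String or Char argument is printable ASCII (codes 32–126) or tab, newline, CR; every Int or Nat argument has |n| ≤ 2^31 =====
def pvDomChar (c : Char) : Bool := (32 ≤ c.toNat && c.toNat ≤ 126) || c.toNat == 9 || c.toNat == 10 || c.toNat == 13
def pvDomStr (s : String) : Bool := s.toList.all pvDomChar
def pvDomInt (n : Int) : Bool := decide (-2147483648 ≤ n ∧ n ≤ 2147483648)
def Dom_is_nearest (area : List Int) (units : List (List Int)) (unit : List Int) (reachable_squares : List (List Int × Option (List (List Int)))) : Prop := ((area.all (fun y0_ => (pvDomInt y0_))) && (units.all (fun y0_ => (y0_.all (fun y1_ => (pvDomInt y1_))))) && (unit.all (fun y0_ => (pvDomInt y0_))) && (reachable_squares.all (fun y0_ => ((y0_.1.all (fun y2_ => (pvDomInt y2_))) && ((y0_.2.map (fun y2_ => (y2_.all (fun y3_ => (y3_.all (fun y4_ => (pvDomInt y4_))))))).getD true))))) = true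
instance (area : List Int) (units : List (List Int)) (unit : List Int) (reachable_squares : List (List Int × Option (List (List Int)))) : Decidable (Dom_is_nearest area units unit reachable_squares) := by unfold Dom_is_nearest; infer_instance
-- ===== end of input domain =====

-- B computes the nearest reachable squares in two shaped passes (build the dict of valid
-- entries, take the minimum distance, filter) instead of A's fused running-min loop;
-- objective: simpler.  On inputs where every path is longer than len(area)**2 the two
-- differ (see D_ below).

-- ===== PORT A =====
-- Fused loop: running minimum `distance` seeded with len(area)**2, dict rebuilt on strict
-- improvement, extended on ties; returns the dict if non-empty, else Python's implicit None.
def is_nearest (area : List Int) (units : List (List Int)) (unit : List Int) (reachable_squares : List (List Int × Option (List (List Int)))) : Option (List (List Int × List (List Int))) :=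
  let init : PySem.Dict (List Int) (List (List Int)) × Int :=
    (PySem.Dict.empty, ((area.length : Int)) ^ 2)
  let res := reachable_squares.foldl
    (fun st p =>
      match p.2 with
      | none => st
      | some rpath =>
        let rdis : Int := (rpath.length : Int) - 1
        if rdis < st.2 then
          (PySem.Dict.insert PySem.Dict.empty p.1 rpath, rdis)
        else if rdis = st.2 then
          (st.1.insert p.1 rpath, st.2)
        else st)
    init
  if 0 < res.1.size then some res.1.items else none

-- ===== PORT B =====
-- Source B: valid = {pos: path for … if path is not None}; if not valid: return None;
-- m = min(len(path)-1 for path in valid.values()); return {pos: path … if len(path)-1 == m}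
def is_nearest_alt (area : List Int) (units : List (List Int)) (unit : List Int) (reachable_squares : List (List Int × Option (List (List Int)))) : Option (List (List Int × List (List Int))) :=
  let valid : PySem.Dict (List Int) (List (List Int)) :=
    reachable_squares.foldl
      (fun d p => match p.2 with | none => d | some path => d.insert p.1 path)
      PySem.Dict.empty
  if valid.size = 0 then none
  else
    let m : Int := ((valid.values.map (fun path => (path.length : Int) - 1)).min?).getD 0
    let closest : PySem.Dict (List Int) (List (List Int)) :=
      valid.items.foldl
        (fun d r => if ((r.2.length : Int) - 1) = m then d.insert r.1 r.2 else d)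
        PySem.Dict.empty
    some closest.items

-- ===== PRECONDITION & SPEC =====
-- Pre_ excludes association lists with duplicate keys: those do not represent any Python
-- dict (the argument is a dict, whose keys are unique), and on them the order in which the
-- two dict-building strategies overwrite entries is an accident of representation.
def Pre_is_nearest (area : List Int) (units : List (List Int)) (unit : List Int) (reachable_squares : List (List Int × Option (List (List Int)))) : Prop :=
  (reachable_squares.map (·.1)).Nodup
instance (area : List Int) (units : List (List Int)) (unit : List Int) (reachable_squares : List (List Int × Option (List (List Int)))) : Decidable (Pre_is_nearest area units unit reachable_squares) := by unfold Pre_is_nearest; infer_instance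

def pvWitness_is_nearest : List Int × List (List Int) × List Int × (List (List Int × Option (List (List Int)))) :=
  ([1], [], [], [([0], some [[0]]), ([1], none)])

-- On inputs where every reachable path is longer than len(area)**2 steps, A returns None
-- (its running minimum is seeded with len(area)**2, so such squares are never recorded)
-- while B returns the squares at the true minimal distance, which is what a nearest-square
-- search should report; the seed is an arbitrary cap, not a specified bound.
def D_is_nearest (area : List Int) (units : List (List Int)) (unit : List Int) (reachable_squares : List (List Int × Option (List (List Int)))) : Prop :=
  (∀ p ∈ reachable_squares, ∀ path ∈ p.2.toList, area.length * area.length + 2 ≤ path.length) ∧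
  (∃ p ∈ reachable_squares, p.2.isSome = true)
instance (area : List Int) (units : List (List Int)) (unit : List Int) (reachable_squares : List (List Int × Option (List (List Int)))) : Decidable (D_is_nearest area units unit reachable_squares) := by unfold D_is_nearest; infer_instance

def Spec_is_nearest (area : List Int) (units : List (List Int)) (unit : List Int) (reachable_squares : List (List Int × Option (List (List Int)))) (out : Option (List (List Int × List (List Int)))) : Prop := ¬ D_is_nearest area units unit reachable_squares → out = is_nearest_alt area units unit reachable_squares
instance (area : List Int) (units : List (List Int)) (unit : List Int) (reachable_squares : List (List Int × Option (List (List Int)))) (out : Option (List (List Int × List (List Int)))) : Decidable (Spec_is_nearest area units unit reachable_squares out) := by unfold Spec_is_nearest; infer_instance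

def pvDiffWitness_is_nearest : List Int × List (List Int) × List Int × (List (List Int × Option (List (List Int)))) :=
  ([], [], [], [([0], some [[0], [1]])])
def pvDiffWitnessOut_is_nearest : (Option (List (List Int × List (List Int)))) × (Option (List (List Int × List (List Int)))) :=
  (none, some [([0], [[0], [1]])])

-- ===== CLAIM (what is proved, stated in full; the proofs are below) =====
def Claim_unchanged_is_nearest : Prop := ∀ (area : List Int) (units : List (List Int)) (unit : List Int) (reachable_squares : List (List Int × Option (List (List Int)))), Dom_is_nearest area units unit reachable_squares → Pre_is_nearest area units unit reachable_squares → Spec_is_nearest area units unit reachable_squares (is_nearest area units unit reachable_squares)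
def Claim_changed_is_nearest : Prop := Dom_is_nearest (pvDiffWitness_is_nearest.1) (pvDiffWitness_is_nearest.2.1) (pvDiffWitness_is_nearest.2.2.1) (pvDiffWitness_is_nearest.2.2.2) ∧ Pre_is_nearest (pvDiffWitness_is_nearest.1) (pvDiffWitness_is_nearest.2.1) (pvDiffWitness_is_nearest.2.2.1) (pvDiffWitness_is_nearest.2.2.2) ∧ D_is_nearest (pvDiffWitness_is_nearest.1) (pvDiffWitness_is_nearest.2.1) (pvDiffWitness_is_nearest.2.2.1) (pvDiffWitness_is_nearest.2.2.2) ∧ is_nearest (pvDiffWitness_is_nearest.1) (pvDiffWitness_is_nearest.2.1) (pvDiffWitness_is_nearest.2.2.1) (pvDiffWitness_is_nearest.2.2.2) = pvDiffWitnessOut_is_nearest.1 ∧ is_nearest_alt (pvDiffWitness_is_nearest.1) (pvDiffWitness_is_nearest.2.1) (pvDiffWitness_is_nearest.2.2.1) (pvDiffWitness_is_nearest.2.2.2) = pvDiffWitnessOut_is_nearest.2 ∧ pvDiffWitnessOut_is_nearest.1 ≠ pvDiffWitnessOut_is_nearest.2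
def Claim_exact_is_nearest : Prop := ∀ (area : List Int) (units : List (List Int)) (unit : List Int) (reachable_squares : List (List Int × Option (List (List Int)))), Dom_is_nearest area units unit reachable_squares → Pre_is_nearest area units unit reachable_squares → D_is_nearest area units unit reachable_squares → is_nearest area units unit reachable_squares ≠ is_nearest_alt area units unit reachable_squares

-- ===== LEMMAS AND PROOFS =====

-- D_ restated over the list of distances of the valid entries.
lemma D_char (area : List Int) (units : List (List Int)) (unit : List Int)
    (rs : List (List Int × Option (List (List Int)))) :
    D_is_nearest area units unit rs ↔
      ((rs.filterMap (fun p => p.2.map (fun path => (path.length : Int) - 1))) ≠ [] ∧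
       ∀ d ∈ rs.filterMap (fun p => p.2.map (fun path => (path.length : Int) - 1)),
         ((area.length : Int)) ^ 2 < d) := by
  unfold D_is_nearest
  have hcap : ∀ path : List (List Int),
      (area.length * area.length + 2 ≤ path.length) ↔
        ((area.length : Int)) ^ 2 < (path.length : Int) - 1 := by
    intro path
    have h : ((area.length * area.length : Nat) : Int) = ((area.length : Int)) ^ 2 := by
      push_cast; ring
    rw [← h]
    omega
  constructor
  · rintro ⟨hall, ⟨p, hp, hs⟩⟩
    constructor
    · intro h0
      rw [List.filterMap_eq_nil_iff] at h0
      have h1 := h0 p hp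
      cases hps : p.2 with
      | none => rw [hps] at hs; simp at hs
      | some path => rw [hps] at h1; simp at h1
    · intro d hd
      obtain ⟨p', hp', he⟩ := List.mem_filterMap.mp hd
      cases hps : p'.2 with
      | none => rw [hps] at he; simp at he
      | some path =>
        rw [hps] at he
        simp only [Option.map_some, Option.some.injEq] at he
        exact he ▸ (hcap path).mp (hall p' hp' path (by simp [hps]))
  · rintro ⟨hne, hall⟩
    constructor
    · intro p hp path hpath
      have hps : p.2 = some path := by simpa using hpath
      exact (hcap path).mpr (hall _ (List.mem_filterMap.mpr ⟨p, hp, by simp [hps]⟩))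
    · obtain ⟨d, hd⟩ := List.exists_mem_of_ne_nil _ hne
      obtain ⟨p, hp, he⟩ := List.mem_filterMap.mp hd
      cases hps : p.2 with
      | none => rw [hps] at he; simp at he
      | some path => exact ⟨p, hp, by simp [hps]⟩

-- A's loop step restricted to the valid (non-None) entries.
def pvStep (st : PySem.Dict (List Int) (List (List Int)) × Int)
    (q : List Int × List (List Int)) : PySem.Dict (List Int) (List (List Int)) × Int :=
  if ((q.2.length : Int) - 1) < st.2 then
    (PySem.Dict.insert PySem.Dict.empty q.1 q.2, (q.2.length : Int) - 1)
  else if ((q.2.length : Int) - 1) = st.2 then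
    (st.1.insert q.1 q.2, st.2)
  else st

-- running minimum of the distances, seeded with d
def pvM (d : Int) (v : List (List Int × List (List Int))) : Int :=
  v.foldl (fun a q => min a ((q.2.length : Int) - 1)) d

-- dict of the entries at distance m, folded from c
def pvClose (c : PySem.Dict (List Int) (List (List Int))) (m : Int)
    (v : List (List Int × List (List Int))) : PySem.Dict (List Int) (List (List Int)) :=
  v.foldl (fun d r => if ((r.2.length : Int) - 1) = m then d.insert r.1 r.2 else d) c

lemma pvM_le (d : Int) (v : List (List Int × List (List Int))) : pvM d v ≤ d := by
  induction v generalizing d with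
  | nil => simp [pvM]
  | cons q rest ih =>
    have h := ih (min d ((q.2.length : Int) - 1))
    simp only [pvM, List.foldl_cons] at *
    omega

lemma pvM_min (a b : Int) (v : List (List Int × List (List Int))) :
    pvM (min a b) v = min a (pvM b v) := by
  induction v generalizing b with
  | nil => simp [pvM]
  | cons q rest ih =>
    simp only [pvM, List.foldl_cons] at *
    rw [min_assoc, ih]

lemma pvM_cons (d : Int) (q : List Int × List (List Int)) (v : List (List Int × List (List Int))) :
    pvM d (q :: v) = pvM (min d ((q.2.length : Int) - 1)) v := rfl

lemma pvM_le_of_mem (d : Int) (v : List (List Int × List (List Int)))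
    (r : List Int × List (List Int)) (hr : r ∈ v) : pvM d v ≤ (r.2.length : Int) - 1 := by
  induction v generalizing d with
  | nil => cases hr
  | cons q rest ih =>
    rw [pvM_cons]
    rcases List.mem_cons.mp hr with h | h
    · subst h
      have := pvM_le (min d ((r.2.length : Int) - 1)) rest
      omega
    · exact ih _ h

lemma pvM_attained (q : List Int × List (List Int)) (rest : List (List Int × List (List Int))) :
    ∃ r ∈ q :: rest, ((r.2.length : Int) - 1) = pvM ((q.2.length : Int) - 1) rest := by
  induction rest generalizing q with
  | nil => exact ⟨q, List.mem_cons_self, rfl⟩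
  | cons p rest ih =>
    rw [pvM_cons]
    by_cases h : ((q.2.length : Int) - 1) ≤ ((p.2.length : Int) - 1)
    · have hmin : min ((q.2.length : Int) - 1) ((p.2.length : Int) - 1) = (q.2.length : Int) - 1 := by omega
      rw [hmin]
      obtain ⟨r, hr, he⟩ := ih q
      exact ⟨r, by rcases List.mem_cons.mp hr with h' | h' <;> simp [h'], he⟩
    · have hmin : min ((q.2.length : Int) - 1) ((p.2.length : Int) - 1) = (p.2.length : Int) - 1 := by omega
      rw [hmin]
      obtain ⟨r, hr, he⟩ := ih p
      exact ⟨r, by rcases List.mem_cons.mp hr with h' | h' <;> simp [h'], he⟩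

lemma fold_skip_none (l : List (List Int × Option (List (List Int))))
    (s : PySem.Dict (List Int) (List (List Int)) × Int) :
    l.foldl
      (fun st p =>
        match p.2 with
        | none => st
        | some rpath =>
          let rdis : Int := (rpath.length : Int) - 1
          if rdis < st.2 then
            (PySem.Dict.insert PySem.Dict.empty p.1 rpath, rdis)
          else if rdis = st.2 then
            (st.1.insert p.1 rpath, st.2)
          else st) s
    = (l.filterMap (fun p => p.2.map (fun path => (p.1, path)))).foldl pvStep s := by
  induction l generalizing s with
  | nil => rfl
  | cons p l ih =>
    rw [List.foldl_cons, List.filterMap_cons]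
    cases hp : p.2 with
    | none =>
      simp only [Option.map_none]
      exact ih _
    | some rpath =>
      simp only [Option.map_some, List.foldl_cons]
      exact ih _

lemma fold_skip_none_ins (l : List (List Int × Option (List (List Int))))
    (d : PySem.Dict (List Int) (List (List Int))) :
    l.foldl (fun d p => match p.2 with | none => d | some path => d.insert p.1 path) d
    = (l.filterMap (fun p => p.2.map (fun path => (p.1, path)))).foldl
        (fun d r => d.insert r.1 r.2) d := by
  induction l generalizing d with
  | nil => rfl
  | cons p l ih =>
    rw [List.foldl_cons, List.filterMap_cons]
    cases hp : p.2 with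
    | none => simp only [Option.map_none]; exact ih _
    | some rpath => simp only [Option.map_some, List.foldl_cons]; exact ih _

lemma ds_eq_map (l : List (List Int × Option (List (List Int)))) :
    l.filterMap (fun p => p.2.map (fun path => (path.length : Int) - 1))
    = (l.filterMap (fun p => p.2.map (fun path => (p.1, path)))).map
        (fun r => (r.2.length : Int) - 1) := by
  induction l with
  | nil => rfl
  | cons p l ih =>
    rw [List.filterMap_cons, List.filterMap_cons]
    cases p.2 with
    | none => simpa using ih
    | some rpath => simp [ih]

lemma keys_sublist (l : List (List Int × Option (List (List Int)))) :
    ((l.filterMap (fun p => p.2.map (fun path => (p.1, path)))).map (·.1)).Sublist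
      (l.map (·.1)) := by
  induction l with
  | nil => simp
  | cons p l ih =>
    rw [List.filterMap_cons]
    cases p.2 with
    | none =>
      simp only [Option.map_none]
      exact List.Sublist.cons _ ih
    | some rpath =>
      simp only [Option.map_some, List.map_cons]
      exact List.Sublist.cons₂ _ ih

lemma pvClose_cons (c : PySem.Dict (List Int) (List (List Int))) (m : Int)
    (q : List Int × List (List Int)) (v : List (List Int × List (List Int))) :
    pvClose c m (q :: v)
      = pvClose (if ((q.2.length : Int) - 1) = m then c.insert q.1 q.2 else c) m v := rfl

lemma foldV_spec (v : List (List Int × List (List Int)))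
    (c : PySem.Dict (List Int) (List (List Int))) (d : Int) :
    v.foldl pvStep (c, d)
      = ((if pvM d v < d then pvClose PySem.Dict.empty (pvM d v) v else pvClose c d v), pvM d v) := by
  induction v generalizing c d with
  | nil => simp [pvM, pvClose]
  | cons q rest ih =>
    have hstep : pvStep (c, d) q
        = if ((q.2.length : Int) - 1) < d then
            (PySem.Dict.insert PySem.Dict.empty q.1 q.2, (q.2.length : Int) - 1)
          else if ((q.2.length : Int) - 1) = d then (c.insert q.1 q.2, d) else (c, d) := rfl
    rw [List.foldl_cons, hstep, pvM_cons, pvClose_cons, pvClose_cons]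
    rcases lt_trichotomy ((q.2.length : Int) - 1) d with hlt | heq | hgt
    · have hmin : min d ((q.2.length : Int) - 1) = (q.2.length : Int) - 1 := by omega
      rw [if_pos hlt, ih, hmin]
      have h1 : pvM ((q.2.length : Int) - 1) rest ≤ (q.2.length : Int) - 1 := pvM_le _ _
      rw [if_pos (show pvM ((q.2.length : Int) - 1) rest < d by omega)]
      rcases lt_or_eq_of_le h1 with hm | hm
      · rw [if_pos hm,
          if_neg (show ¬ ((q.2.length : Int) - 1 = pvM ((q.2.length : Int) - 1) rest) by omega)]
      · rw [if_neg (show ¬ pvM ((q.2.length : Int) - 1) rest < (q.2.length : Int) - 1 by omega),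
          hm, if_pos rfl]
    · have hmin : min d ((q.2.length : Int) - 1) = d := by omega
      rw [if_neg (by omega), if_pos heq, ih, hmin]
      have h1 : pvM d rest ≤ d := pvM_le _ _
      rcases lt_or_eq_of_le h1 with hm | hm
      · rw [if_pos hm, if_pos hm,
          if_neg (show ¬ ((q.2.length : Int) - 1 = pvM d rest) by omega)]
      · rw [if_neg (by omega), if_neg (by omega), hm, if_pos heq]
    · have hmin : min d ((q.2.length : Int) - 1) = d := by omega
      rw [if_neg (by omega), if_neg (by omega), ih, hmin]
      have h1 : pvM d rest ≤ d := pvM_le _ _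
      rcases lt_or_eq_of_le h1 with hm | hm
      · rw [if_pos hm, if_pos hm,
          if_neg (show ¬ ((q.2.length : Int) - 1 = pvM d rest) by omega)]
      · rw [if_neg (by omega), if_neg (by omega), hm,
          if_neg (show ¬ ((q.2.length : Int) - 1 = d) by omega)]

lemma size_insert_pos (d : PySem.Dict (List Int) (List (List Int)))
    (k : List Int) (w : List (List Int)) : 0 < (d.insert k w).size := by
  rw [PySem.Dict.size_insert]
  split
  · rename_i h
    have hk : k ∈ d.keys := (PySem.Dict.contains_iff_mem_keys _ _).mp h
    have hpos : 0 < d.size := by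
      simp only [PySem.Dict.keys] at hk
      simp only [PySem.Dict.size]
      cases hi : d.items with
      | nil => rw [hi] at hk; simp at hk
      | cons a l => simp
    omega
  · omega

lemma pvClose_size_mono (m : Int) (v : List (List Int × List (List Int)))
    (c : PySem.Dict (List Int) (List (List Int))) : c.size ≤ (pvClose c m v).size := by
  induction v generalizing c with
  | nil => simp [pvClose]
  | cons q rest ih =>
    rw [pvClose_cons]
    split
    · calc c.size ≤ (c.insert q.1 q.2).size := by rw [PySem.Dict.size_insert]; split <;> omega
        _ ≤ _ := ih _
    · exact ih _

lemma pvClose_size_pos (m : Int) (v : List (List Int × List (List Int)))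
    (c : PySem.Dict (List Int) (List (List Int)))
    (r : List Int × List (List Int)) (hr : r ∈ v) (he : ((r.2.length : Int) - 1) = m) :
    0 < (pvClose c m v).size := by
  induction v generalizing c with
  | nil => cases hr
  | cons q rest ih =>
    rw [pvClose_cons]
    rcases List.mem_cons.mp hr with h | h
    · subst h
      rw [if_pos he]
      calc 0 < (c.insert r.1 r.2).size := size_insert_pos _ _ _
        _ ≤ _ := pvClose_size_mono _ _ _
    · exact ih _ h

-- A's and B's results written over the valid-entry list v.
lemma valid_items (l : List (List Int × Option (List (List Int))))
    (hnd : (l.map (·.1)).Nodup) :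
    ((l.filterMap (fun p => p.2.map (fun path => (p.1, path)))).foldl
        (fun d r => d.insert r.1 r.2) (PySem.Dict.empty : PySem.Dict (List Int) (List (List Int)))).items
      = l.filterMap (fun p => p.2.map (fun path => (p.1, path))) := by
  have hnd' : ((l.filterMap (fun p => p.2.map (fun path => (p.1, path)))).map (·.1)).Nodup :=
    hnd.sublist (keys_sublist l)
  have h := PySem.Dict.items_foldl_insert_fresh
    (l := l.filterMap (fun p => p.2.map (fun path => (p.1, path))))
    (k := fun r => r.1) (v := fun r => r.2)
    (d := (PySem.Dict.empty : PySem.Dict (List Int) (List (List Int))))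
    (by intro a _; simp [PySem.Dict.contains_empty]) hnd'
  simpa using h

lemma foldl_min_comm (l : List Int) (a b : Int) :
    l.foldl min (min a b) = min a (l.foldl min b) := by
  induction l generalizing b with
  | nil => rfl
  | cons c l ih =>
    simp only [List.foldl_cons]
    rw [min_assoc, ih]

lemma min?_elim_eq_foldl (l : List Int) (a : Int) :
    l.min?.elim a (min a) = l.foldl min a := by
  induction l generalizing a with
  | nil => rfl
  | cons b l ih =>
    rw [List.min?_cons]
    simp only [Option.elim_some, List.foldl_cons]
    rw [ih b, foldl_min_comm]

lemma min?_cons_getD (a : Int) (l : List Int) :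
    ((a :: l).min?).getD 0 = l.foldl min a := by
  rw [List.min?_cons]
  simp only [Option.getD_some]
  exact min?_elim_eq_foldl l a

-- ===== VERDICT (by name: the statements are the Claim_ definitions above) =====
theorem is_nearest_spec : Claim_unchanged_is_nearest := by
  intro area units unit rs _ hpre hnd
  unfold Pre_is_nearest at hpre
  rw [D_char] at hnd
  show is_nearest area units unit rs = is_nearest_alt area units unit rs
  unfold is_nearest is_nearest_alt
  simp only []
  rw [fold_skip_none, fold_skip_none_ins]
  set v := rs.filterMap (fun p => p.2.map (fun path => (p.1, path))) with hv
  have hitems := valid_items rs hpre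
  rw [← hv] at hitems
  cases hvc : v with
  | nil =>
    rw [foldV_spec]
    rw [hvc] at hitems
    simp [pvClose, pvM, PySem.Dict.size, PySem.Dict.empty]
  | cons q rest =>
    rw [hvc] at hitems
    have hsize : ((q :: rest).foldl (fun d r => d.insert r.1 r.2)
        (PySem.Dict.empty : PySem.Dict (List Int) (List (List Int)))).size = (q :: rest).length := by
      simp only [PySem.Dict.size]
      rw [hitems]
    have hvals : ((q :: rest).foldl (fun d r => d.insert r.1 r.2)
        (PySem.Dict.empty : PySem.Dict (List Int) (List (List Int)))).values
        = (q :: rest).map (·.2) := by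
      simp only [PySem.Dict.values]
      rw [hitems]
    set cap : Int := ((area.length : Int)) ^ 2 with hcap
    set dm : Int := pvM ((q.2.length : Int) - 1) rest with hdm
    -- some distance is within the cap, so the cap is inert
    have hds : ¬ (∀ d ∈ (q :: rest).map (fun r => (r.2.length : Int) - 1), cap < d) := by
      intro hall
      refine hnd ⟨by rw [ds_eq_map, ← hv, hvc]; simp, ?_⟩
      rw [ds_eq_map, ← hv, hvc]
      exact hall
    obtain ⟨dd, hdd, hle⟩ : ∃ d ∈ (q :: rest).map (fun r => (r.2.length : Int) - 1), ¬ cap < d := by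
      by_contra hno
      exact hds fun d hd => by_contra fun hlt => hno ⟨d, hd, hlt⟩
    obtain ⟨r0, hr0, hr0e⟩ := List.mem_map.mp hdd
    have hdm_le : dm ≤ cap := by
      have h1 : dm ≤ (r0.2.length : Int) - 1 := by
        rcases List.mem_cons.mp hr0 with h | h
        · subst h; rw [hdm]; exact pvM_le _ _
        · rw [hdm]; exact pvM_le_of_mem _ _ _ h
      omega
    have hMv : pvM cap (q :: rest) = dm := by
      rw [pvM_cons, pvM_min, ← hdm]
      omega
    obtain ⟨rm, hrm, hrme⟩ := pvM_attained q rest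
    rw [← hdm] at hrme
    -- A side
    rw [foldV_spec, hMv]
    have hA : (if dm < cap then pvClose PySem.Dict.empty dm (q :: rest)
          else pvClose PySem.Dict.empty cap (q :: rest))
        = pvClose PySem.Dict.empty dm (q :: rest) := by
      rcases lt_or_eq_of_le hdm_le with h | h
      · rw [if_pos h]
      · rw [if_neg (by omega), h]
    simp only [hA]
    -- B side
    have hBsize : ¬ (((q :: rest).foldl (fun d r => d.insert r.1 r.2)
        (PySem.Dict.empty : PySem.Dict (List Int) (List (List Int)))).size = 0) := by
      rw [hsize]; simp
    rw [if_neg hBsize]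
    have hBm : ((((q :: rest).foldl (fun d r => d.insert r.1 r.2)
        (PySem.Dict.empty : PySem.Dict (List Int) (List (List Int)))).values.map
          (fun path => (path.length : Int) - 1)).min?).getD 0 = dm := by
      rw [hvals]
      simp only [List.map_cons, List.map_map]
      rw [min?_cons_getD, hdm]
      unfold pvM
      rw [List.foldl_map]
      rfl
    rw [hBm, hitems]
    have hApos : 0 < (pvClose PySem.Dict.empty dm (q :: rest)).size :=
      pvClose_size_pos dm (q :: rest) PySem.Dict.empty rm hrm hrme
    rw [if_pos hApos]
    rfl

theorem is_nearest_changed : Claim_changed_is_nearest := by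
  unfold Claim_changed_is_nearest; decide

theorem is_nearest_tight : Claim_exact_is_nearest := by
  intro area units unit rs _ hpre hd
  unfold Pre_is_nearest at hpre
  rw [D_char] at hd
  obtain ⟨hne, hall⟩ := hd
  unfold is_nearest is_nearest_alt
  simp only []
  rw [fold_skip_none, fold_skip_none_ins]
  set v := rs.filterMap (fun p => p.2.map (fun path => (p.1, path))) with hv
  have hitems := valid_items rs hpre
  rw [← hv] at hitems
  rw [ds_eq_map, ← hv] at hne hall
  cases hvc : v with
  | nil => rw [hvc] at hne; simp at hne
  | cons q rest =>
    rw [hvc] at hitems hall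
    set cap : Int := ((area.length : Int)) ^ 2 with hcap
    have hallv : ∀ r ∈ q :: rest, cap < (r.2.length : Int) - 1 := by
      intro r hr
      exact hall _ (List.mem_map.mpr ⟨r, hr, rfl⟩)
    obtain ⟨rm, hrm, hrme⟩ := pvM_attained q rest
    have hdm_gt : cap < pvM ((q.2.length : Int) - 1) rest := by
      rw [← hrme]; exact hallv rm hrm
    have hMv : pvM cap (q :: rest) = cap := by
      rw [pvM_cons, pvM_min]
      omega
    rw [foldV_spec, hMv]
    rw [if_neg (lt_irrefl cap)]
    have hclose0 : ∀ (w : List (List Int × List (List Int)))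
        (c : PySem.Dict (List Int) (List (List Int))),
        (∀ r ∈ w, cap < (r.2.length : Int) - 1) → pvClose c cap w = c := by
      intro w
      induction w with
      | nil => intro c _; rfl
      | cons p w ih =>
        intro c hw
        rw [pvClose_cons]
        have hp : cap < (p.2.length : Int) - 1 := hw p List.mem_cons_self
        rw [if_neg (by omega)]
        exact ih _ (fun r hr => hw r (List.mem_cons_of_mem _ hr))
    have hsz : (pvClose PySem.Dict.empty cap (q :: rest)).size = 0 := by
      rw [hclose0 (q :: rest) PySem.Dict.empty hallv]
      simp [PySem.Dict.size, PySem.Dict.empty]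
    rw [hsz, if_neg (lt_irrefl 0)]
    have hBsize : ¬ (((q :: rest).foldl (fun d r => d.insert r.1 r.2)
        (PySem.Dict.empty : PySem.Dict (List Int) (List (List Int)))).size = 0) := by
      simp only [PySem.Dict.size]
      rw [hitems]
      simp
    rw [if_neg hBsize]
    simp
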